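-- pv_equiv track=rewrite | github.com/dreamtides/dreamtides | scripts/utility/reorder_rendered_cards.py | is_in_multiline_string
-- ===== SOURCE A (Python) =====
-- def is_in_multiline_string(lines: list[str], index: int) -> bool:
--     """Check if the line at index is inside a triple-quoted multiline string."""
--     in_multiline = False
--     for i in range(index):
--         line = lines[i]
--         count = line.count('"""')
--         if count % 2 == 1:
--             in_multiline = not in_multiline
--     return in_multiline
-- ===== SOURCE B (Python) =====
-- def is_in_multiline_string(lines: list[str], index: int) -> bool:
--     """Check if the line at index is inside a triple-quoted multiline string."""
--     preceding = lines[:max(index, 0)]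
--     return "\n".join(preceding).count('"""') % 2 == 1
-- ===== Notes on version B (the rewrite author's own statement) =====
-- stated objective: simpler
-- what changed: Drops the per-line loop with its boolean toggle entirely: B slices the lines before index, joins them with newline (a character that cannot occur inside the pattern, so no match crosses a boundary) and tests the parity of a single .count('"""') on the joined string.
import Mathlib
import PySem

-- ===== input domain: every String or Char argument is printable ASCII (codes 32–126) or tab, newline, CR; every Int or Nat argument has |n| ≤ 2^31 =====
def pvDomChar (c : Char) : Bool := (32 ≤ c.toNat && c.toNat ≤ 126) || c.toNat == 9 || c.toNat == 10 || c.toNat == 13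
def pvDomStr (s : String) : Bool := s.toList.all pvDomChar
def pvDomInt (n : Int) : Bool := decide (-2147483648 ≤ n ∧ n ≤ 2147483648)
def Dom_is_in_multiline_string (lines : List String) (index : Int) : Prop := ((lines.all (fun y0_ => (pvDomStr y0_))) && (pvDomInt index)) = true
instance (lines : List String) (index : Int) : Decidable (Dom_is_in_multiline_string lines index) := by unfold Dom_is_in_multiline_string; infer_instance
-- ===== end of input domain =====

-- B replaces A's per-line toggle loop by one count of '"""' on the newline-joined prefix of the lines (objective: simpler).


-- ===== PORT A =====
-- for i in range(index): line = lines[i] (may raise IndexError → Option state); toggle flag on odd count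
def is_in_multiline_string (lines : List String) (index : Int) : Bool :=
  ((PySem.List.pyRange 0 index 1).foldl
    (fun acc i => acc.bind fun in_multiline =>
      (PySem.List.pyGet? lines i).map fun line =>
        if PySem.Str.count line "\"\"\"" % 2 == 1 then !in_multiline else in_multiline)
    (some false)).getD false

-- ===== PORT B =====
-- preceding = lines[:max(index, 0)]; return "\n".join(preceding).count('"""') % 2 == 1
def is_in_multiline_string_alt (lines : List String) (index : Int) : Bool :=
  PySem.Str.count (PySem.Str.join "\n" (PySem.List.slice lines none (some (max index 0)))) "\"\"\"" % 2 == 1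

-- ===== PRECONDITION & SPEC =====
-- Pre_ excludes exactly the inputs where A raises IndexError (index beyond the number of lines).
def Pre_is_in_multiline_string (lines : List String) (index : Int) : Prop :=
  index ≤ (lines.length : Int)
instance (lines : List String) (index : Int) : Decidable (Pre_is_in_multiline_string lines index) := by
  unfold Pre_is_in_multiline_string; infer_instance

def pvWitness_is_in_multiline_string : List String × Int := (["\"\"\"", "x"], 1)

def Spec_is_in_multiline_string (lines : List String) (index : Int) (out : Bool) : Prop := out = is_in_multiline_string_alt lines index
instance (lines : List String) (index : Int) (out : Bool) : Decidable (Spec_is_in_multiline_string lines index out) := by unfold Spec_is_in_multiline_string; infer_instance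

-- ===== CLAIM (what is proved, stated in full; the proofs are below) =====
def Claim_equal_is_in_multiline_string : Prop := ∀ (lines : List String) (index : Int), Dom_is_in_multiline_string lines index → Pre_is_in_multiline_string lines index → Spec_is_in_multiline_string lines index (is_in_multiline_string lines index)

-- ===== LEMMAS AND PROOFS =====

-- the pattern '"""' as a character list
def pvPat : List Char := ['\"', '\"', '\"']

lemma pvPat_toList : ("\"\"\"" : String).toList = pvPat := by decide

-- greedy non-overlapping count of pvPat, structural version of Python's str.count scan
def pvCnt : List Char → Nat
  | [] => 0
  | x :: t => if pvPat.isPrefixOf (x :: t) then pvCnt (t.drop 2) + 1 else pvCnt t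
termination_by l => l.length
decreasing_by
  · simp only [List.length_cons, List.length_drop]; omega
  · simp

lemma pvCnt_nil : pvCnt [] = 0 := by rw [pvCnt]

lemma pvCnt_cons (x : Char) (t : List Char) :
    pvCnt (x :: t) = if pvPat.isPrefixOf (x :: t) then pvCnt (t.drop 2) + 1 else pvCnt t := by
  rw [pvCnt]

lemma pvPfx3 (a b c : Char) (r : List Char) :
    pvPat.isPrefixOf (a :: b :: c :: r) = true ↔ ('\"' = a ∧ '\"' = b ∧ '\"' = c) := by
  simp [pvPat, List.isPrefixOf]

-- total number of '"""' occurrences in the first n lines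
def pvSum (lines : List String) (n : Nat) : Nat :=
  ((lines.take n).map (fun s => PySem.Str.count s "\"\"\"")).sum

lemma pvGo_eq : ∀ (fuel : Nat) (l : List Char) (acc : Nat), l.length ≤ fuel →
    PySem.Chars.count.go pvPat fuel l acc = acc + pvCnt l := by
  intro fuel
  induction fuel with
  | zero =>
      intro l acc h
      have : l = [] := by cases l <;> simp_all
      subst this
      simp [PySem.Chars.count.go, pvCnt_nil]
  | succ m ih =>
      intro l acc h
      cases l with
      | nil => simp [PySem.Chars.count.go, pvCnt_nil]
      | cons x t =>
          rw [PySem.Chars.count.go]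
          by_cases hp : pvPat.isPrefixOf (x :: t)
          · rw [if_pos hp]
            have hd : List.drop pvPat.length (x :: t) = t.drop 2 := by
              simp [pvPat]
            rw [hd, ih _ _ (by simp only [List.length_cons] at h; simp only [List.length_drop]; omega)]
            rw [pvCnt_cons, if_pos hp]
            omega
          · rw [if_neg hp, ih _ _ (by simp at h; omega)]
            rw [pvCnt_cons, if_neg hp]

lemma pvCount_eq_cnt (l : List Char) : PySem.Chars.count l pvPat = pvCnt l := by
  unfold PySem.Chars.count
  rw [if_neg (by simp [pvPat])]
  simpa using pvGo_eq l.length l 0 (le_refl _)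

lemma pvCnt_nl (l2 : List Char) : pvCnt ('\n' :: l2) = pvCnt l2 := by
  rw [pvCnt_cons, if_neg (by simp [pvPat, List.isPrefixOf])]

lemma pvCnt_single (a : Char) : pvCnt [a] = 0 := by
  rw [pvCnt_cons, if_neg (by simp [pvPat, List.isPrefixOf])]
  exact pvCnt_nil

-- a newline separator can take part in no match, so counts add across it
lemma pvCnt_sep : ∀ (n : Nat) (l1 : List Char), l1.length ≤ n → ∀ (l2 : List Char),
    pvCnt (l1 ++ '\n' :: l2) = pvCnt l1 + pvCnt l2 := by
  intro n
  induction n with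
  | zero =>
      intro l1 h l2
      have : l1 = [] := by cases l1 <;> simp_all
      subst this
      rw [List.nil_append, pvCnt_nl, pvCnt_nil, Nat.zero_add]
  | succ m ih =>
      intro l1 h l2
      match l1 with
      | [] =>
          rw [List.nil_append, pvCnt_nl, pvCnt_nil, Nat.zero_add]
      | [a] =>
          show pvCnt (a :: '\n' :: l2) = pvCnt [a] + pvCnt l2
          rw [pvCnt_cons, if_neg (by simp [pvPat, List.isPrefixOf]), pvCnt_nl,
            pvCnt_single, Nat.zero_add]
      | [a, b] =>
          show pvCnt (a :: b :: '\n' :: l2) = pvCnt [a, b] + pvCnt l2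
          rw [pvCnt_cons, if_neg (by simp [pvPat, List.isPrefixOf])]
          have h1 : pvCnt (b :: '\n' :: l2) = pvCnt [b] + pvCnt l2 := by
            have := ih [b] (by simp at h ⊢; omega) l2
            simpa using this
          rw [h1, pvCnt_single]
          rw [pvCnt_cons, if_neg (by simp [pvPat, List.isPrefixOf]), pvCnt_single]
      | a :: b :: c :: rest =>
          simp only [List.cons_append]
          by_cases hq : ('\"' = a ∧ '\"' = b ∧ '\"' = c)
          · rw [pvCnt_cons, if_pos ((pvPfx3 a b c _).mpr hq)]
            simp only [List.drop_succ_cons, List.drop_zero]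
            rw [ih rest (by simp at h; omega) l2]
            rw [pvCnt_cons (t := b :: c :: rest), if_pos ((pvPfx3 a b c rest).mpr hq)]
            simp only [List.drop_succ_cons, List.drop_zero]
            omega
          · rw [pvCnt_cons, if_neg (by rw [pvPfx3]; exact hq)]
            have h1 : pvCnt (b :: c :: (rest ++ '\n' :: l2)) = pvCnt (b :: c :: rest) + pvCnt l2 := by
              have := ih (b :: c :: rest) (by simp at h ⊢; omega) l2
              simpa using this
            rw [h1]
            rw [pvCnt_cons (t := b :: c :: rest), if_neg (by rw [pvPfx3]; exact hq)]

-- summing per-line counts equals counting on the newline-joined list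
lemma pvCnt_join : ∀ (ls : List String),
    pvCnt (PySem.Chars.join ['\n'] (ls.map String.toList))
      = (ls.map (fun s => PySem.Str.count s "\"\"\"")).sum := by
  intro ls
  induction ls with
  | nil => simp [PySem.Chars.join_nil, pvCnt_nil]
  | cons s rest ih =>
      cases rest with
      | nil =>
          simp only [List.map_cons, List.map_nil, PySem.Chars.join_singleton]
          rw [← pvCount_eq_cnt, ← pvPat_toList, ← PySem.Str.count_eq]
          simp
      | cons t rest' =>
          simp only [List.map_cons] at ih ⊢
          rw [PySem.Chars.join_cons_cons, List.append_assoc, List.singleton_append,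
            pvCnt_sep s.toList.length s.toList (le_refl _) _, ih]
          rw [← pvCount_eq_cnt, ← pvPat_toList, ← PySem.Str.count_eq]
          simp [List.sum_cons]

lemma pvBeqDecide (n : Nat) : (n % 2 == 1) = decide (n % 2 = 1) := by
  rcases Nat.mod_two_eq_zero_or_one n with h | h <;> simp [h]

-- B computes the parity of the total count over the first index.toNat lines
lemma pvB_eq (lines : List String) (index : Int) :
    is_in_multiline_string_alt lines index = decide (pvSum lines index.toNat % 2 = 1) := by
  unfold is_in_multiline_string_alt
  have hslice : PySem.List.slice lines none (some (max index 0))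
      = lines.take index.toNat := by
    rw [PySem.List.slice_to lines (le_max_right index 0)]
    congr 1
    omega
  rw [hslice, PySem.Str.count_eq, PySem.Str.toList_join, pvPat_toList,
    show ("\n" : String).toList = ['\n'] from rfl, pvCount_eq_cnt, pvCnt_join]
  unfold pvSum
  exact pvBeqDecide _

lemma pvXorStep (a k : Nat) (b : Bool) :
    (if k % 2 == 1 then !(b ^^ decide (a % 2 = 1)) else (b ^^ decide (a % 2 = 1)))
      = (b ^^ decide ((a + k) % 2 = 1)) := by
  rcases Nat.mod_two_eq_zero_or_one a with ha | ha <;>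
    rcases Nat.mod_two_eq_zero_or_one k with hk | hk
  · have h : (a + k) % 2 = 0 := by omega
    simp [ha, hk, h]
  · have h : (a + k) % 2 = 1 := by omega
    simp [ha, hk, h]
  · have h : (a + k) % 2 = 1 := by omega
    simp [ha, hk, h]
  · have h : (a + k) % 2 = 0 := by omega
    simp [ha, hk, h]

lemma pvA_fold (lines : List String) (b : Bool) :
    ∀ (n : Nat), n ≤ lines.length →
      ((PySem.List.pyRange 0 (n : Int) 1).foldl
        (fun acc i => acc.bind fun in_multiline =>
          (PySem.List.pyGet? lines i).map fun line =>
            if PySem.Str.count line "\"\"\"" % 2 == 1 then !in_multiline else in_multiline)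
        (some b))
      = some (b ^^ decide (pvSum lines n % 2 = 1)) := by
  intro n
  induction n with
  | zero =>
      intro _
      rw [PySem.List.pyRange_one_eq_nil (by omega)]
      simp [pvSum]
  | succ m ih =>
      intro h
      have hm : m < lines.length := by omega
      have hcast : ((m + 1 : Nat) : Int) = (m : Int) + 1 := by push_cast; ring
      rw [hcast, PySem.List.pyRange_one_succ_right (by omega), List.foldl_append,
        ih (by omega)]
      simp only [List.foldl_cons, List.foldl_nil, Option.bind_some]
      rw [PySem.List.pyGet?_natCast, List.getElem?_eq_getElem hm]
      have hsum : pvSum lines (m + 1) = pvSum lines m + PySem.Str.count lines[m] "\"\"\"" := by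
        unfold pvSum
        simp only [List.map_take]
        rw [List.sum_take_succ _ m (by simpa using hm)]
        simp
      rw [hsum]
      simp only [Option.map_some]
      exact congrArg some (pvXorStep (pvSum lines m) (PySem.Str.count lines[m] "\"\"\"") b)

-- ===== VERDICT (by name: the statement is the Claim_ definition above) =====
theorem is_in_multiline_string_spec : Claim_equal_is_in_multiline_string := by
  intro lines index _ hPre
  unfold Spec_is_in_multiline_string Pre_is_in_multiline_string at *
  rw [pvB_eq]
  unfold is_in_multiline_string
  by_cases h : index ≤ 0
  · rw [PySem.List.pyRange_one_eq_nil h]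
    have h0 : index.toNat = 0 := by omega
    simp [h0, pvSum]
  · obtain ⟨n, rfl⟩ : ∃ n : Nat, index = (n : Int) := ⟨index.toNat, by omega⟩
    rw [pvA_fold lines false n (by omega)]
    simp
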